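-- pv_equiv track=rewrite | github.com/sueszli/vector-database-benchmark | dataset/python-mutated/exchange.py | get_next_limit_in_list
-- ===== SOURCE A (Python) =====
-- from typing import Any, Coroutine, Dict, List, Literal, Optional, Tuple, Union
--
-- def get_next_limit_in_list(limit: int, limit_range: Optional[List[int]], range_required: bool=True):
--     if False:
--         while True:
--             i = 10
--     '\n        Get next greater value in the list.\n        Used by fetch_l2_order_book if the api only supports a limited range\n        '
--     if not limit_range:
--         return limit
--     result = min([x for x in limit_range if limit <= x] + [max(limit_range)])
--     if not range_required and limit > result:
--         return None
--     return result
-- ===== SOURCE B (Python) =====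
-- from typing import Any, Coroutine, Dict, List, Literal, Optional, Tuple, Union
--
-- def get_next_limit_in_list(limit: int, limit_range: Optional[List[int]], range_required: bool=True):
--     """Sorted copy + hand-rolled bisect_left instead of filter/min/max scans."""
--     if not limit_range:
--         return limit
--     s = sorted(limit_range)          # a copy; the argument is never mutated
--     lo, hi = 0, len(s)
--     while lo < hi:                   # bisect_left: first index with s[mid] >= limit
--         mid = (lo + hi) // 2
--         if s[mid] < limit:
--             lo = mid + 1
--         else:
--             hi = mid
--     result = s[lo] if lo < len(s) else s[-1]
--     if not range_required and limit > result:
--         return None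
--     return result
-- ===== Notes on version B (the rewrite author's own statement) =====
-- stated objective: alternative
-- what changed: Replaces the filter-comprehension plus min()/max() scans with a sorted copy and a hand-written bisect_left binary search whose landing index (or the last element as fallback) is the answer.
import Mathlib
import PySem

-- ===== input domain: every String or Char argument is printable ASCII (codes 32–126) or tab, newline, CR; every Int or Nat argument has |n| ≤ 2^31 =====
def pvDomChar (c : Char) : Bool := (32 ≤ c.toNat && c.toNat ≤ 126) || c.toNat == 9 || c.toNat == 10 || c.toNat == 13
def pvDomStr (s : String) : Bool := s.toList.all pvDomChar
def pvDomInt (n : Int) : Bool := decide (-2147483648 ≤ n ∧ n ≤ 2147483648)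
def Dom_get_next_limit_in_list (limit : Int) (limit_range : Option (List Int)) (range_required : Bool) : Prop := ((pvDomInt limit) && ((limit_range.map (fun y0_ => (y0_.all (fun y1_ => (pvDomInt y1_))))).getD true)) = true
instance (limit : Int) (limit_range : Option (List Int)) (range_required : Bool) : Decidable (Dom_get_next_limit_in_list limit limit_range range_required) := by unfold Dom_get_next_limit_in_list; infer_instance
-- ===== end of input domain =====

-- B replaces A's filter-comprehension + min()/max() scans by a sorted copy and a
-- hand-written bisect_left binary search (alternative algorithm; not claimed faster).


-- ===== PORT A =====
def get_next_limit_in_list (limit : Int) (limit_range : Option (List Int)) (range_required : Bool) : Option Int :=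
  match limit_range with
  | none => some limit                                   -- `not limit_range` on None
  | some l =>
    if l = [] then some limit                            -- `not limit_range` on []
    else
      -- l ≠ [], so max?/min? below are `some`; the getD default 0 is never read
      let result := (PySem.List.min?
          (l.filter (fun x => decide (limit ≤ x)) ++ [(PySem.List.max? l (fun y => y)).getD 0])
          (fun y => y)).getD 0
      if !range_required && decide (limit > result) then none else some result

-- ===== PORT B =====
-- hand-written bisect_left while-loop from Source B; s.getD mid 0 is exact since lo < hi ≤ s.length keeps mid in range
def pvBsLoop (s : List Int) (limit : Int) (lo hi : Nat) : Nat :=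
  if lo < hi then
    if s.getD ((lo + hi) / 2) 0 < limit then pvBsLoop s limit ((lo + hi) / 2 + 1) hi
    else pvBsLoop s limit lo ((lo + hi) / 2)
  else lo
termination_by hi - lo
decreasing_by all_goals omega

def get_next_limit_in_list_alt (limit : Int) (limit_range : Option (List Int)) (range_required : Bool) : Option Int :=
  match limit_range with
  | none => some limit
  | some l =>
    if l = [] then some limit
    else
      let s := PySem.List.sorted l (fun y => y) false
      let lo := pvBsLoop s limit 0 s.length
      -- s ≠ [] here, so both indices are in range and s[-1] is s[len-1]: getD's default is never read
      let result := if lo < s.length then s.getD lo 0 else s.getD (s.length - 1) 0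
      if !range_required && decide (limit > result) then none else some result

-- ===== PRECONDITION & SPEC =====
def Spec_get_next_limit_in_list (limit : Int) (limit_range : Option (List Int)) (range_required : Bool) (out : Option Int) : Prop := out = get_next_limit_in_list_alt limit limit_range range_required
instance (limit : Int) (limit_range : Option (List Int)) (range_required : Bool) (out : Option Int) : Decidable (Spec_get_next_limit_in_list limit limit_range range_required out) := by unfold Spec_get_next_limit_in_list; infer_instance

-- ===== CLAIM (what is proved, stated in full; the proofs are below) =====
def Claim_equal_get_next_limit_in_list : Prop := ∀ (limit : Int) (limit_range : Option (List Int)) (range_required : Bool), Dom_get_next_limit_in_list limit limit_range range_required → Spec_get_next_limit_in_list limit limit_range range_required (get_next_limit_in_list limit limit_range range_required)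

-- ===== LEMMAS AND PROOFS =====

-- the binary-search loop of B lands on the first index whose element is ≥ limit (s.length if none)
lemma pvBsLoop_spec (s : List Int) (limit : Int)
    (hs : s.Pairwise (fun a b => a ≤ b)) :
    ∀ (n lo hi : Nat), hi - lo ≤ n → lo ≤ hi → hi ≤ s.length →
    (∀ j (hj : j < s.length), j < lo → s[j] < limit) →
    (∀ j (hj : j < s.length), hi ≤ j → limit ≤ s[j]) →
    pvBsLoop s limit lo hi ≤ s.length ∧
    (∀ j (hj : j < s.length), j < pvBsLoop s limit lo hi → s[j] < limit) ∧
    (∀ j (hj : j < s.length), pvBsLoop s limit lo hi ≤ j → limit ≤ s[j]) := by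
  intro n
  induction n with
  | zero =>
    intro lo hi hn hlohi hhis hlo hhi
    have : lo = hi := by omega
    rw [pvBsLoop]
    simp only [this, lt_irrefl, if_false]
    exact ⟨by omega, fun j hj hjlo => hlo j hj (by omega), fun j hj hjlo => hhi j hj (by omega)⟩
  | succ n ih =>
    intro lo hi hn hlohi hhis hlo hhi
    rw [pvBsLoop]
    by_cases h : lo < hi
    · simp only [h, if_true]
      have hmid : (lo + hi) / 2 < s.length := by omega
      have hget : s.getD ((lo + hi) / 2) 0 = s[(lo + hi) / 2] := List.getD_eq_getElem s 0 hmid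
      have hmono : ∀ p q (hp : p < s.length) (hq : q < s.length), p < q → s[p] ≤ s[q] :=
        fun p q hp hq hpq => (List.pairwise_iff_getElem.mp hs) p q hp hq hpq
      by_cases hc : s.getD ((lo + hi) / 2) 0 < limit
      · simp only [hc, if_true]
        refine ih ((lo + hi) / 2 + 1) hi (by omega) (by omega) hhis ?_ hhi
        intro j hj hjlt
        rcases Nat.lt_or_ge j ((lo + hi) / 2) with hlt | hge
        · exact lt_of_le_of_lt (hmono j _ hj hmid hlt) (hget ▸ hc)
        · have : j = (lo + hi) / 2 := by omega
          subst this; exact hget ▸ hc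
      · simp only [hc, if_false]
        refine ih lo ((lo + hi) / 2) (by omega) (by omega) (by omega) hlo ?_
        intro j hj hjge
        have hmidle : limit ≤ s[(lo + hi) / 2] := by rw [← hget]; omega
        rcases Nat.lt_or_ge ((lo + hi) / 2) j with hlt | hge
        · exact le_trans hmidle (hmono _ j hmid hj hlt)
        · have : j = (lo + hi) / 2 := by omega
          subst this; exact hmidle
    · simp only [h, if_false]
      have : lo = hi := by omega
      exact ⟨by omega, fun j hj hjlo => hlo j hj (by omega),
             fun j hj hjlo => hhi j hj (by omega)⟩

-- the core value equality: A's min-of-filter expression equals B's bisect landing element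
lemma pv_result_eq (limit : Int) (l : List Int) (hl : l ≠ []) :
    (PySem.List.min?
        (l.filter (fun x => decide (limit ≤ x)) ++ [(PySem.List.max? l (fun y => y)).getD 0])
        (fun y => y)).getD 0 =
    (if pvBsLoop (PySem.List.sorted l (fun y => y) false) limit 0 (PySem.List.sorted l (fun y => y) false).length < (PySem.List.sorted l (fun y => y) false).length
     then (PySem.List.sorted l (fun y => y) false).getD (pvBsLoop (PySem.List.sorted l (fun y => y) false) limit 0 (PySem.List.sorted l (fun y => y) false).length) 0
     else (PySem.List.sorted l (fun y => y) false).getD ((PySem.List.sorted l (fun y => y) false).length - 1) 0) := by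
  set s := PySem.List.sorted l (fun y => y) false with hsdef
  have hmem : ∀ x, x ∈ s ↔ x ∈ l := fun x => PySem.List.mem_sorted l (fun y => y) false x
  have hpair : s.Pairwise (fun a b => a ≤ b) := PySem.List.sorted_pairwise l (fun y => y)
  have hmono : ∀ p q (hp : p < s.length) (hq : q < s.length), p < q → s[p] ≤ s[q] :=
    fun p q hp hq hpq => (List.pairwise_iff_getElem.mp hpair) p q hp hq hpq
  have hsne : s ≠ [] := by
    intro h; exact hl ((PySem.List.sorted_eq_nil_iff l (fun y => y) false).mp h)
  have hslen : 0 < s.length := List.length_pos_iff.mpr hsne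
  -- max of l
  obtain ⟨mx, hmx⟩ : ∃ mx, PySem.List.max? l (fun y => y) = some mx := by
    cases hcase : PySem.List.max? l (fun y => y) with
    | none => exact absurd ((PySem.List.max?_eq_none_iff l (fun y => y)).mp hcase) hl
    | some m => exact ⟨m, rfl⟩
  have hmxmem : mx ∈ l := PySem.List.max?_mem hmx
  have hmxmax : ∀ y ∈ l, y ≤ mx := fun y hy => PySem.List.max?_isMax hmx y hy
  -- bisect result
  obtain ⟨hrle, hrlt, hrge⟩ := pvBsLoop_spec s limit hpair s.length 0 s.length
    (by omega) (by omega) (le_refl _) (fun j hj h => absurd h (Nat.not_lt_zero j))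
    (fun j hj h => absurd hj (by omega))
  set r := pvBsLoop s limit 0 s.length with hrdef
  have hlast_mem : s[s.length - 1] ∈ l := (hmem _).mp (s.getElem_mem (by omega))
  have hlast_max : ∀ y ∈ s, y ≤ s[s.length - 1] := by
    intro y hy
    obtain ⟨j, hj, hjy⟩ := List.mem_iff_getElem.mp hy
    rcases Nat.lt_or_ge j (s.length - 1) with h | h
    · exact hjy ▸ hmono j (s.length - 1) hj (by omega) h
    · have : j = s.length - 1 := by omega
      subst this; omega
  rw [hmx]
  simp only [Option.getD_some]
  by_cases hF : l.filter (fun x => decide (limit ≤ x)) = []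
  · -- no element of l is ≥ limit: A returns mx, B takes the last-element branch
    have hall : ∀ x ∈ l, x < limit := by
      intro x hx
      have := List.filter_eq_nil_iff.mp hF x hx
      simp at this; omega
    have hr_eq : r = s.length := by
      by_contra h
      have hrlt' : r < s.length := by omega
      have := hrge r hrlt' (le_refl r)
      have := hall s[r] ((hmem _).mp (s.getElem_mem hrlt'))
      omega
    rw [hF]
    simp only [List.nil_append, hr_eq, lt_irrefl, if_false,
      List.getD_eq_getElem s 0 (show s.length - 1 < s.length by omega)]
    have h1 : (PySem.List.min? [mx] (fun y => y)) = some mx := by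
      simpa using PySem.List.min?_id_cons mx []
    rw [h1, Option.getD_some]
    exact le_antisymm (hlast_max mx ((hmem mx).mpr hmxmem)) (hmxmax _ hlast_mem)
  · -- some element of l is ≥ limit: A's min over the filter equals s[r]
    obtain ⟨w, hwmem, hwge⟩ : ∃ w ∈ l, limit ≤ w := by
      obtain ⟨w, hw⟩ := List.exists_mem_of_ne_nil _ hF
      have := List.mem_filter.mp hw
      exact ⟨w, this.1, by simpa using this.2⟩
    have hr_lt : r < s.length := by
      by_contra h
      obtain ⟨j, hj, hjw⟩ := List.mem_iff_getElem.mp ((hmem w).mpr hwmem)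
      have := hrlt j hj (by omega)
      omega
    obtain ⟨m, hm⟩ : ∃ m, PySem.List.min?
        (l.filter (fun x => decide (limit ≤ x)) ++ [mx]) (fun y => y) = some m := by
      cases hcase : PySem.List.min? (l.filter (fun x => decide (limit ≤ x)) ++ [mx]) (fun y => y) with
      | none => simpa using (PySem.List.min?_eq_none_iff _ (fun y => y)).mp hcase
      | some m => exact ⟨m, rfl⟩
    have hmmem := PySem.List.min?_mem hm
    have hmmin : ∀ y ∈ l.filter (fun x => decide (limit ≤ x)) ++ [mx], m ≤ y :=
      fun y hy => PySem.List.min?_isMin hm y hy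
    have hr_ge : limit ≤ s[r] := hrge r hr_lt (le_refl r)
    have hr_mem_l : s[r] ∈ l := (hmem _).mp (s.getElem_mem hr_lt)
    have hr_in_F : s[r] ∈ l.filter (fun x => decide (limit ≤ x)) ++ [mx] := by
      apply List.mem_append_left
      exact List.mem_filter.mpr ⟨hr_mem_l, by simpa using hr_ge⟩
    have h1 : m ≤ s[r] := hmmin _ hr_in_F
    have h2 : s[r] ≤ m := by
      rcases List.mem_append.mp hmmem with hmf | hmx'
      · obtain ⟨hml, hmge⟩ := List.mem_filter.mp hmf
        have hmge' : limit ≤ m := by simpa using hmge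
        obtain ⟨j, hj, hjm⟩ := List.mem_iff_getElem.mp ((hmem m).mpr hml)
        have hjr : r ≤ j := by
          by_contra h
          have := hrlt j hj (by omega)
          omega
        rcases Nat.lt_or_ge r j with h | h
        · exact hjm ▸ hmono r j hr_lt hj h
        · have : j = r := by omega
          subst this; omega
      · have : m = mx := by simpa using hmx'
        subst this
        exact hmxmax _ hr_mem_l
    rw [hm, Option.getD_some, if_pos hr_lt, List.getD_eq_getElem s 0 hr_lt]
    omega

-- ===== VERDICT (by name: the statement is the Claim_ definition above) =====
theorem get_next_limit_in_list_spec : Claim_equal_get_next_limit_in_list := by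
  intro limit limit_range range_required _
  unfold Spec_get_next_limit_in_list
  match limit_range with
  | none => rfl
  | some l =>
    by_cases hl : l = []
    · simp [get_next_limit_in_list, get_next_limit_in_list_alt, hl]
    · simp only [get_next_limit_in_list, get_next_limit_in_list_alt, hl, if_false]
      rw [pv_result_eq limit l hl]
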